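-- pv_equiv track=rewrite | github.com/AngusNicolson/stable-diffusion | ldm/data/element.py | remove_matching_items
-- ===== SOURCE A (Python) =====
-- def remove_matching_items(combinations, restrictions):
--     filtered_arr = []
--     for combo in combinations:
--         match_found = False
--         for restriction in restrictions:
--             if all(x is None or x == y for x, y in zip(restriction, combo)):
--                 match_found = True
--                 break
--         if not match_found:
--             filtered_arr.append(combo)
--     return filtered_arr
-- ===== SOURCE B (Python) =====
-- def remove_matching_items(combinations, restrictions):
--     # Index restrictions by the mask of their specified positions: per combo length n,
--     # build a dict mask -> set of projected value tuples; each combo then matches some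
--     # restriction iff, for one of the (few, distinct) masks, its projection is in the set.
--     specs = [[i for i in range(len(r)) if r[i] is not None] for r in restrictions]
--     cache = {}
--     out = []
--     for combo in combinations:
--         n = len(combo)
--         idx = cache.get(n)
--         if idx is None:
--             idx = {}
--             for r, spec in zip(restrictions, specs):
--                 mask = tuple(i for i in spec if i < n)
--                 idx.setdefault(mask, set()).add(tuple(r[i] for i in mask))
--             cache[n] = idx
--         if not any(tuple(combo[i] for i in mask) in keys for mask, keys in idx.items()):
--             out.append(combo)
--     return out
-- ===== Notes on version B (the rewrite author's own statement) =====
-- stated objective: alternative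
-- what changed: B indexes the restrictions once per distinct combination length into a dict keyed by the mask of specified positions, each mapping to a set of projected value tuples, so every combination is tested by one set lookup per distinct mask instead of scanning all restrictions with a flag-and-break loop.
import Mathlib
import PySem

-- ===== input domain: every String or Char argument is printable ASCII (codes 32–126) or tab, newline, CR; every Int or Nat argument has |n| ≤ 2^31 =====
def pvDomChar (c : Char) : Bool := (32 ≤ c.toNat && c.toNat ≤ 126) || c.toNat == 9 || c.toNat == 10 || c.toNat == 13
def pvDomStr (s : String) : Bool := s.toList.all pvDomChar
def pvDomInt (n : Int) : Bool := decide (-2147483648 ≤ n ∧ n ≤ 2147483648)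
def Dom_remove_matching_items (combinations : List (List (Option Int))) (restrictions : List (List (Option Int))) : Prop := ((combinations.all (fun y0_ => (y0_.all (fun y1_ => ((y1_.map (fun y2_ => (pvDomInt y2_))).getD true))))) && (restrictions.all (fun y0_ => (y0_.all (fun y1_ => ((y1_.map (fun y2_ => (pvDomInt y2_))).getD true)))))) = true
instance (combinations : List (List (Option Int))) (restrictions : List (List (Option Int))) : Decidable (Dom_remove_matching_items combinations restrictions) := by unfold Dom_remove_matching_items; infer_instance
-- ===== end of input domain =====

-- B replaces A's per-combination scan over all restrictions by a lookup index: restrictions are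
-- grouped by the mask of their specified positions into a dict mapping each mask to the set of
-- projected value tuples (one such index per distinct combination length, cached), and each
-- combination then does one set lookup per distinct mask.

-- ===== PORT A =====
-- 'all(x is None or x == y for x, y in zip(restriction, combo))'
def pvMatchesA (restriction combo : List (Option Int)) : Bool :=
  (restriction.zip combo).all (fun p => p.1.isNone || p.1 == p.2)

def remove_matching_items (combinations : List (List (Option Int))) (restrictions : List (List (Option Int))) : List (List (Option Int)) :=
  combinations.foldl (fun filtered_arr combo =>
    -- 'for restriction in restrictions: if …: match_found = True; break'
    let match_found := restrictions.any (fun restriction => pvMatchesA restriction combo)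
    if !match_found then filtered_arr ++ [combo] else filtered_arr) []

-- ===== PORT B =====
-- '[i for i in range(len(r)) if r[i] is not None]'
def pvSpec (r : List (Option Int)) : List Nat :=
  (List.range r.length).filter (fun i => ((r[i]?).getD none).isSome)

-- 'tuple(xs[i] for i in mask)'  (every index in a mask is in range for its list)
def pvProj (xs : List (Option Int)) (mask : List Nat) : List (Option Int) :=
  mask.map (fun i => (xs[i]?).getD none)

-- the index-building loop for combination length n: mask -> set of projected restriction tuples
def pvBuildIdx (pairs : List (List (Option Int) × List Nat)) (n : Nat) :
    PySem.Dict (List Nat) (PySem.Set (List (Option Int))) :=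
  pairs.foldl (fun idx p =>
    let mask := p.2.filter (fun i => i < n)
    idx.insert mask ((idx.getD mask PySem.Set.empty).add (pvProj p.1 mask))) PySem.Dict.empty

-- 'idx = cache.get(n); if idx is None: … ; cache[n] = idx'
def pvLookupIdx (pairs : List (List (Option Int) × List Nat))
    (cache : PySem.Dict Nat (PySem.Dict (List Nat) (PySem.Set (List (Option Int))))) (n : Nat) :
    PySem.Dict Nat (PySem.Dict (List Nat) (PySem.Set (List (Option Int)))) ×
      PySem.Dict (List Nat) (PySem.Set (List (Option Int))) :=
  match cache.get? n with
  | some idx => (cache, idx)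
  | none => (cache.insert n (pvBuildIdx pairs n), pvBuildIdx pairs n)

-- one iteration of the main loop
def pvStep (pairs : List (List (Option Int) × List Nat))
    (st : PySem.Dict Nat (PySem.Dict (List Nat) (PySem.Set (List (Option Int)))) × List (List (Option Int)))
    (combo : List (Option Int)) :
    PySem.Dict Nat (PySem.Dict (List Nat) (PySem.Set (List (Option Int)))) × List (List (Option Int)) :=
  let ci := pvLookupIdx pairs st.1 combo.length
  if ci.2.items.any (fun p => PySem.Set.contains p.2 (pvProj combo p.1)) then (ci.1, st.2)
  else (ci.1, st.2 ++ [combo])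

def remove_matching_items_alt (combinations : List (List (Option Int))) (restrictions : List (List (Option Int))) : List (List (Option Int)) :=
  let specs := restrictions.map pvSpec
  (combinations.foldl (pvStep (restrictions.zip specs)) (PySem.Dict.empty, [])).2

-- ===== PRECONDITION & SPEC =====
def Spec_remove_matching_items (combinations : List (List (Option Int))) (restrictions : List (List (Option Int))) (out : List (List (Option Int))) : Prop := out = remove_matching_items_alt combinations restrictions
instance (combinations : List (List (Option Int))) (restrictions : List (List (Option Int))) (out : List (List (Option Int))) : Decidable (Spec_remove_matching_items combinations restrictions out) := by unfold Spec_remove_matching_items; infer_instance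

-- ===== CLAIM (what is proved, stated in full; the proofs are below) =====
def Claim_equal_remove_matching_items : Prop := ∀ (combinations : List (List (Option Int))) (restrictions : List (List (Option Int))), Dom_remove_matching_items combinations restrictions → Spec_remove_matching_items combinations restrictions (remove_matching_items combinations restrictions)

-- ===== LEMMAS AND PROOFS =====

-- membership in the specified-position list
theorem mem_pvSpec (r : List (Option Int)) (i : Nat) :
    i ∈ pvSpec r ↔ ((r[i]?).getD none).isSome = true := by
  unfold pvSpec
  simp only [List.mem_filter, List.mem_range]
  constructor
  · rintro ⟨-, h⟩; exact h
  · intro h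
    refine ⟨?_, h⟩
    by_contra hlt
    rw [List.getElem?_eq_none (by omega)] at h
    simp at h

-- A's zip-based match test, characterised by indices
theorem pvMatchesA_iff (r w : List (Option Int)) :
    pvMatchesA r w = true ↔
      ∀ i v, (r[i]?).getD none = some v → i < w.length → (w[i]?).getD none = some v := by
  induction r generalizing w with
  | nil =>
      simp only [pvMatchesA, List.zip_nil_left, List.all_nil, true_iff]
      intro i v h; simp at h
  | cons x r ih =>
      cases w with
      | nil => simp [pvMatchesA]
      | cons y w =>
          simp only [pvMatchesA, List.zip_cons_cons, List.all_cons, Bool.and_eq_true] at *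
          rw [ih]
          constructor
          · rintro ⟨hx, hrest⟩ i v hv hi
            cases i with
            | zero =>
                simp only [List.getElem?_cons_zero, Option.getD_some] at hv ⊢
                subst hv
                rcases Bool.or_eq_true .. |>.mp hx with hx | hx
                · simp at hx
                · exact (beq_iff_eq.mp hx).symm ▸ rfl
            | succ i =>
                simp only [List.getElem?_cons_succ] at hv ⊢
                exact hrest i v hv (by simpa using hi)
          · intro h
            constructor
            · cases hx : x with
              | none => simp
              | some v =>
                  have := h 0 v (by simp [hx]) (by simp)
                  simp only [List.getElem?_cons_zero, Option.getD_some] at this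
                  simp [this]
            · intro i v hv hi
              exact h (i+1) v (by simpa using hv) (by simpa using hi)

-- B's mask-projection match test, characterised the same way
theorem pvProjEq_iff (r w : List (Option Int)) :
    (pvProj w ((pvSpec r).filter (fun i => i < w.length))
      = pvProj r ((pvSpec r).filter (fun i => i < w.length))) ↔
      ∀ i v, (r[i]?).getD none = some v → i < w.length → (w[i]?).getD none = some v := by
  unfold pvProj
  rw [List.map_inj_left]
  constructor
  · intro h i v hv hi
    have hm : i ∈ (pvSpec r).filter (fun i => i < w.length) := by
      simp only [List.mem_filter, mem_pvSpec, hv, decide_eq_true_eq]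
      exact ⟨rfl, hi⟩
    rw [h i hm, hv]
  · intro h i hm
    simp only [List.mem_filter, mem_pvSpec, decide_eq_true_eq] at hm
    obtain ⟨hs, hi⟩ := hm
    cases hv : (r[i]?).getD none with
    | none => simp [hv] at hs
    | some v => exact h i v hv hi

-- one insertion step of the index: what the 'any' lookup sees afterwards
theorem any_items_insert (idx : PySem.Dict (List Nat) (PySem.Set (List (Option Int))))
    (hnd : idx.keys.Nodup) (k : List Nat) (v : List (Option Int)) (w : List (Option Int)) :
    ((idx.insert k ((idx.getD k PySem.Set.empty).add v)).items.any
        (fun p => PySem.Set.contains p.2 (pvProj w p.1)) = true) ↔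
      ((idx.items.any (fun p => PySem.Set.contains p.2 (pvProj w p.1)) = true) ∨ pvProj w k = v) := by
  by_cases hc : idx.contains k = true
  · obtain ⟨s, hs⟩ : ∃ s, idx.get? k = some s := by
      have h := PySem.Dict.contains_eq_isSome_get? idx k
      rw [hc] at h
      exact Option.isSome_iff_exists.mp h.symm
    have hgd : idx.getD k PySem.Set.empty = s := PySem.Dict.getD_of_get?_eq_some idx PySem.Set.empty hs
    have hmem : (k, s) ∈ idx.items := PySem.Dict.mem_items_of_get?_eq_some idx hs
    have hp2eq : ∀ p ∈ idx.items, p.1 = k → p.2 = s := by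
      intro p hp hpk
      have h2 := PySem.Dict.get?_of_mem_items idx (k := p.1) (v := p.2) hp hnd
      rw [hpk, hs] at h2
      exact (Option.some.inj h2).symm
    rw [PySem.Dict.items_insert_of_contains idx _ hc, List.any_map]
    simp only [List.any_eq_true, Function.comp]
    constructor
    · rintro ⟨p, hp, hFg⟩
      by_cases hpk : p.1 = k
      · rw [if_pos (by simp [hpk])] at hFg
        simp only [hgd, PySem.Set.contains, List.contains_eq_mem, decide_eq_true_eq] at hFg
        rcases (PySem.Set.mem_add s v _).mp hFg with h | h
        · exact Or.inl ⟨(k, s), hmem, by simpa [PySem.Set.contains, List.contains_eq_mem] using h⟩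
        · exact Or.inr h
      · rw [if_neg (by simp [hpk])] at hFg
        exact Or.inl ⟨p, hp, hFg⟩
    · rintro (⟨p, hp, hF⟩ | hv)
      · refine ⟨p, hp, ?_⟩
        by_cases hpk : p.1 = k
        · rw [if_pos (by simp [hpk])]
          simp only [hgd, PySem.Set.contains, List.contains_eq_mem, decide_eq_true_eq]
          refine (PySem.Set.mem_add s v _).mpr (Or.inl ?_)
          have := hp2eq p hp hpk
          simpa [PySem.Set.contains, List.contains_eq_mem, hpk, this] using hF
        · rw [if_neg (by simp [hpk])]
          exact hF
      · refine ⟨(k, s), hmem, ?_⟩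
        simp only [if_pos (by simp : ((k, s).1 == k) = true), hgd,
          PySem.Set.contains, List.contains_eq_mem, decide_eq_true_eq]
        exact (PySem.Set.mem_add s v _).mpr (Or.inr hv)
  · have hc' : idx.contains k = false := by simpa using hc
    rw [PySem.Dict.items_insert_of_not_contains idx _ hc', PySem.Dict.getD_of_not_contains idx _ hc']
    simp [List.any_append, PySem.Set.contains, List.contains_eq_mem, PySem.Set.add, PySem.Set.empty]

-- the built index, folded from any start, answers 'some restriction matches'
theorem any_items_buildIdx_aux (ps : List (List (Option Int) × List Nat)) (n : Nat)
    (w : List (Option Int)) (idx0 : PySem.Dict (List Nat) (PySem.Set (List (Option Int))))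
    (hnd : idx0.keys.Nodup) :
    ((ps.foldl (fun idx p =>
        let mask := p.2.filter (fun i => i < n)
        idx.insert mask ((idx.getD mask PySem.Set.empty).add (pvProj p.1 mask))) idx0).items.any
          (fun q => PySem.Set.contains q.2 (pvProj w q.1)) = true) ↔
      ((idx0.items.any (fun q => PySem.Set.contains q.2 (pvProj w q.1)) = true) ∨
        ∃ p ∈ ps, pvProj w (p.2.filter (fun i => i < n)) = pvProj p.1 (p.2.filter (fun i => i < n))) := by
  induction ps generalizing idx0 with
  | nil => simp
  | cons p ps ih =>
      simp only [List.foldl_cons]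
      rw [ih _ (PySem.Dict.nodup_keys_insert _ _ _ hnd),
        any_items_insert idx0 hnd (p.2.filter (fun i => i < n)) (pvProj p.1 (p.2.filter (fun i => i < n))) w]
      simp only [List.mem_cons]
      constructor
      · rintro ((h | h) | ⟨q, hq, h⟩)
        · exact Or.inl h
        · exact Or.inr ⟨p, Or.inl rfl, h⟩
        · exact Or.inr ⟨q, Or.inr hq, h⟩
      · rintro (h | ⟨q, (rfl | hq), h⟩)
        · exact Or.inl (Or.inl h)
        · exact Or.inl (Or.inr h)
        · exact Or.inr ⟨q, hq, h⟩

-- B's lookup 'does some restriction match this combo' equals A's scan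
theorem any_items_buildIdx (rs : List (List (Option Int))) (w : List (Option Int)) :
    (pvBuildIdx (rs.zip (rs.map pvSpec)) w.length).items.any
        (fun q => PySem.Set.contains q.2 (pvProj w q.1)) =
      rs.any (fun r => pvMatchesA r w) := by
  have hzip : rs.zip (rs.map pvSpec) = rs.map (fun r => (r, pvSpec r)) := by
    induction rs with
    | nil => rfl
    | cons a l ih => simp only [List.map_cons, List.zip_cons_cons, ih]
  rw [Bool.eq_iff_iff]
  unfold pvBuildIdx
  rw [any_items_buildIdx_aux _ _ _ _ PySem.Dict.nodup_keys_empty, hzip]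
  simp only [PySem.Dict.empty, List.any_nil, Bool.false_eq_true, false_or,
    List.mem_map, List.any_eq_true]
  constructor
  · rintro ⟨p, ⟨r, hr, rfl⟩, h⟩
    exact ⟨r, hr, (pvMatchesA_iff r w).mpr ((pvProjEq_iff r w).mp h)⟩
  · rintro ⟨r, hr, h⟩
    exact ⟨(r, pvSpec r), ⟨r, hr, rfl⟩, (pvProjEq_iff r w).mpr ((pvMatchesA_iff r w).mp h)⟩

-- the cache invariant: every cached index is the index for its length
def pvCacheOK (pairs : List (List (Option Int) × List Nat))
    (cache : PySem.Dict Nat (PySem.Dict (List Nat) (PySem.Set (List (Option Int))))) : Prop :=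
  ∀ n idx, cache.get? n = some idx → idx = pvBuildIdx pairs n

theorem pvLookupIdx_snd (pairs : List (List (Option Int) × List Nat))
    (cache : PySem.Dict Nat (PySem.Dict (List Nat) (PySem.Set (List (Option Int))))) (n : Nat)
    (hc : pvCacheOK pairs cache) : (pvLookupIdx pairs cache n).2 = pvBuildIdx pairs n := by
  unfold pvLookupIdx
  cases hg : cache.get? n with
  | none => rfl
  | some idx => exact hc n idx hg

theorem pvLookupIdx_inv (pairs : List (List (Option Int) × List Nat))
    (cache : PySem.Dict Nat (PySem.Dict (List Nat) (PySem.Set (List (Option Int))))) (n : Nat)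
    (hc : pvCacheOK pairs cache) : pvCacheOK pairs (pvLookupIdx pairs cache n).1 := by
  unfold pvLookupIdx
  cases hg : cache.get? n with
  | none =>
      intro m idx2 hm
      rw [PySem.Dict.get?_insert] at hm
      split at hm
      · next h => subst h; exact (Option.some.inj hm).symm
      · exact hc m idx2 hm
  | some idx => exact hc

-- B's main loop, from any state satisfying the invariant
theorem pvLoop (rs : List (List (Option Int))) (cs : List (List (Option Int)))
    (cache : PySem.Dict Nat (PySem.Dict (List Nat) (PySem.Set (List (Option Int)))))
    (out : List (List (Option Int)))
    (hc : pvCacheOK (rs.zip (rs.map pvSpec)) cache) :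
    (cs.foldl (pvStep (rs.zip (rs.map pvSpec))) (cache, out)).2 =
      out ++ cs.filter (fun w => !rs.any (fun r => pvMatchesA r w)) := by
  induction cs generalizing cache out with
  | nil => simp
  | cons w cs ih =>
      simp only [List.foldl_cons, List.filter_cons]
      have hstep : pvStep (rs.zip (rs.map pvSpec)) (cache, out) w =
          ((pvLookupIdx (rs.zip (rs.map pvSpec)) cache w.length).1,
            if rs.any (fun r => pvMatchesA r w) then out else out ++ [w]) := by
        simp only [pvStep]
        rw [pvLookupIdx_snd _ _ _ hc, any_items_buildIdx]
        cases rs.any (fun r => pvMatchesA r w) <;> simp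
      rw [hstep]
      rw [ih _ _ (pvLookupIdx_inv _ _ _ hc)]
      cases rs.any (fun r => pvMatchesA r w) <;> simp

-- ===== VERDICT (by name: the statement is the Claim_ definition above) =====
theorem remove_matching_items_spec : Claim_equal_remove_matching_items := by
  intro combinations restrictions _
  unfold Spec_remove_matching_items remove_matching_items
  simp only [remove_matching_items_alt]
  rw [pvLoop restrictions combinations PySem.Dict.empty [] (by intro n idx h; rw [PySem.Dict.get?_empty] at h; cases h)]
  have hshape : (fun (filtered_arr : List (List (Option Int))) combo =>
      if (!restrictions.any fun restriction => pvMatchesA restriction combo) = true then filtered_arr ++ [combo]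
      else filtered_arr)
      = (fun acc x =>
        if (fun combo => !restrictions.any (fun r => pvMatchesA r combo)) x = true then acc ++ [id x] else acc) := by
    funext acc x; rfl
  rw [hshape, PySem.List.foldl_append_if (fun combo => !restrictions.any (fun r => pvMatchesA r combo)) id combinations []]
  simp
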